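-- pv_equiv track=rewrite | github.com/Eddiek1102/CS1301 | birthday_paradox.py | same_birthdays
-- ===== SOURCE A (Python) =====
-- def same_birthdays(birthdays: list):
--     same_birthday_counter = 0
--     birthdays_only_once = []
--     for birthday in birthdays:
--         if birthday not in birthdays_only_once:
--             birthdays_only_once.append(birthday)
--         elif birthday in birthdays_only_once:
--             same_birthday_counter += 1
--     return same_birthday_counter
-- ===== SOURCE B (Python) =====
-- def same_birthdays(birthdays: list):
--     return len(birthdays) - len(set(birthdays))
-- ===== Notes on version B (the rewrite author's own statement) =====
-- stated objective: simpler
-- what changed: Replaced the accumulate-with-membership-test loop by the closed form len(birthdays) - len(set(birthdays)): repeat occurrences = total minus distinct.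
import Mathlib
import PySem

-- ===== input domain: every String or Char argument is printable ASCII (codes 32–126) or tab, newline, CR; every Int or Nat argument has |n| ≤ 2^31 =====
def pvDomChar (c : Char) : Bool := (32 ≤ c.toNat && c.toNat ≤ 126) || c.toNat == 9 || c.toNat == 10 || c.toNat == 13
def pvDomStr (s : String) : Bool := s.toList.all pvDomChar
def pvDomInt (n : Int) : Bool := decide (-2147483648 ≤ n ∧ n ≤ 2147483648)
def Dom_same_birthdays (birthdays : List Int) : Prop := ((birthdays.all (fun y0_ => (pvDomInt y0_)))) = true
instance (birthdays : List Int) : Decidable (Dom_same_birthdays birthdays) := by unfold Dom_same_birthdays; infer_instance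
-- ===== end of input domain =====

-- B replaces A's membership-test loop by the closed form: repeats = length − number of distinct values (simpler).

-- ===== PORT A =====
-- loop body: if birthday not in seen: append; elif birthday in seen: counter += 1
def same_birthdays (birthdays : List Int) : Int :=
  (birthdays.foldl
    (fun (st : Int × List Int) birthday =>
      if ¬ (birthday ∈ st.2) then (st.1, st.2 ++ [birthday])
      else if birthday ∈ st.2 then (st.1 + 1, st.2)
      else st)
    (0, [])).1

-- ===== PORT B =====
def same_birthdays_alt (birthdays : List Int) : Int :=
  (birthdays.length : Int) - ((PySem.Set.ofList birthdays).length : Int)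

-- ===== PRECONDITION & SPEC =====
def Spec_same_birthdays (birthdays : List Int) (out : Int) : Prop := out = same_birthdays_alt birthdays
instance (birthdays : List Int) (out : Int) : Decidable (Spec_same_birthdays birthdays out) := by unfold Spec_same_birthdays; infer_instance

-- ===== CLAIM (what is proved, stated in full; the proofs are below) =====
def Claim_equal_same_birthdays : Prop := ∀ (birthdays : List Int), Dom_same_birthdays birthdays → Spec_same_birthdays birthdays (same_birthdays birthdays)

-- ===== LEMMAS AND PROOFS =====

theorem sb_loop_invariant (xs : List Int) (c : Int) (seen : List Int) :
    ((xs.foldl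
      (fun (st : Int × List Int) birthday =>
        if ¬ (birthday ∈ st.2) then (st.1, st.2 ++ [birthday])
        else if birthday ∈ st.2 then (st.1 + 1, st.2)
        else st)
      (c, seen)).1 : Int)
    = c + (xs.length : Int) + (seen.length : Int) - ((PySem.Set.update seen xs).length : Int) := by
  induction xs generalizing c seen with
  | nil => simp [PySem.Set.update]
  | cons x xs ih =>
    by_cases hx : x ∈ seen
    · have hadd : PySem.Set.add seen x = seen := by
        simp [PySem.Set.add, PySem.Set.contains, hx]
      simp only [List.foldl_cons, hx, not_true, if_false, if_true]
      rw [ih]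
      simp only [PySem.Set.update, List.foldl_cons, hadd, List.length_cons]
      push_cast
      ring
    · have hadd : PySem.Set.add seen x = seen ++ [x] := by
        simp [PySem.Set.add, PySem.Set.contains, hx]
      simp only [List.foldl_cons, hx, not_false_iff, if_true]
      rw [ih]
      simp only [PySem.Set.update, List.foldl_cons, hadd, List.length_append, List.length_cons, List.length_nil]
      push_cast
      ring

-- ===== VERDICT (by name: the statement is the Claim_ definition above) =====
theorem same_birthdays_spec : Claim_equal_same_birthdays := by
  intro birthdays _
  unfold Spec_same_birthdays same_birthdays same_birthdays_alt
  rw [sb_loop_invariant]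
  rw [PySem.Set.update_nil_left]
  simp
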